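-- pv_equiv track=rewrite | github.com/manolo-assistant/locron | locron.py | _replace_flag_value
-- ===== SOURCE A (Python) =====
-- def _replace_flag_value(argv: list, flag: str, new_value: str) -> list:
--     """Replace a flag's value in argv."""
--     result = []
--     i = 0
--     while i < len(argv):
--         if argv[i] == flag and i + 1 < len(argv):
--             result.append(flag)
--             result.append(new_value)
--             i += 2
--         else:
--             result.append(argv[i])
--             i += 1
--     return result
-- ===== SOURCE B (Python) =====
-- def _replace_flag_value(argv: list, flag: str, new_value: str) -> list:
--     """Replace a flag's value in argv: two staged passes — first collect the set of
--     positions to overwrite, then rebuild the list by comprehension."""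
--     replaced = set()
--     for j, x in enumerate(argv):
--         if x == flag and j not in replaced and j + 1 < len(argv):
--             replaced.add(j + 1)
--     return [new_value if i in replaced else x for i, x in enumerate(argv)]
-- ===== Notes on version B (the rewrite author's own statement) =====
-- stated objective: alternative
-- what changed: Replaces A's single index-based while loop with look-ahead and skip-by-two by a two-stage algorithm: a first pass over enumerate(argv) collects the set of positions to overwrite, then a comprehension rebuilds the list replacing exactly those positions.
import Mathlib
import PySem

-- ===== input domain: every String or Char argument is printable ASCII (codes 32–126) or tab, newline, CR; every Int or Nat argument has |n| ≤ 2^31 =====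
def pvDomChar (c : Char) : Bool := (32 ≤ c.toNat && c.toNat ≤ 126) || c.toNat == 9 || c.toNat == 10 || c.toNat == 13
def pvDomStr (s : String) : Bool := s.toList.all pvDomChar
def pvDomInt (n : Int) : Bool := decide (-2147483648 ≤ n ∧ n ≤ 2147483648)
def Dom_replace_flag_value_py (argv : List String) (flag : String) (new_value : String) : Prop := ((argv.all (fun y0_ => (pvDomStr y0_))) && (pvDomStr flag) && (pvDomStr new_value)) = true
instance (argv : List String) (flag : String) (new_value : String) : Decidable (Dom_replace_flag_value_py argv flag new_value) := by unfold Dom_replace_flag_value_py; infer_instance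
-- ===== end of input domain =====

-- B replaces A's single index-skipping while loop by two staged passes: collect the set of positions
-- to overwrite, then rebuild by comprehension; objective: alternative algorithm, same O(n) cost.


-- ===== PORT A =====
-- while i < len(argv): look-ahead on argv[i] and argv[i+1], skipping two on a replaced flag
def replace_flag_value_go (argv : List String) (flag new_value : String)
    (i : Nat) (result : List String) : List String :=
  if h : i < argv.length then
    if argv[i] = flag ∧ i + 1 < argv.length then
      replace_flag_value_go argv flag new_value (i + 2) (result ++ [flag, new_value])
    else
      replace_flag_value_go argv flag new_value (i + 1) (result ++ [argv[i]])
  else result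
termination_by argv.length - i

def replace_flag_value_py (argv : List String) (flag : String) (new_value : String) : List String :=
  replace_flag_value_go argv flag new_value 0 []

-- ===== PORT B =====
-- pass 1: for j, x in enumerate(argv): collect {j+1 | x == flag, j unconsumed, j+1 in range} into a set;
-- pass 2: [new_value if i in replaced else x for i, x in enumerate(argv)]
def replace_flag_value_py_alt (argv : List String) (flag : String) (new_value : String) : List String :=
  let replaced : PySem.Set Int :=
    (PySem.List.enumerate argv 0).foldl
      (fun s p =>
        if p.2 = flag ∧ ¬ p.1 ∈ s ∧ p.1 + 1 < (argv.length : Int)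
        then PySem.Set.add s (p.1 + 1) else s)
      PySem.Set.empty
  (PySem.List.enumerate argv 0).map (fun p => if p.1 ∈ replaced then new_value else p.2)

-- ===== PRECONDITION & SPEC =====
def Spec_replace_flag_value_py (argv : List String) (flag : String) (new_value : String) (out : List String) : Prop := out = replace_flag_value_py_alt argv flag new_value
instance (argv : List String) (flag : String) (new_value : String) (out : List String) : Decidable (Spec_replace_flag_value_py argv flag new_value out) := by unfold Spec_replace_flag_value_py; infer_instance

-- ===== CLAIM (what is proved, stated in full; the proofs are below) =====
def Claim_equal_replace_flag_value_py : Prop := ∀ (argv : List String) (flag : String) (new_value : String), Dom_replace_flag_value_py argv flag new_value → Spec_replace_flag_value_py argv flag new_value (replace_flag_value_py argv flag new_value)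

-- ===== LEMMAS AND PROOFS =====

-- reference value: replacement on a suffix (matches A's case split)
def repRef (flag new_value : String) : List String → List String
  | [] => []
  | [x] => [x]
  | x :: y :: ys =>
    if x = flag then flag :: new_value :: repRef flag new_value ys
    else x :: repRef flag new_value (y :: ys)

-- reference index set: positions overwritten, for a suffix starting at absolute index j
def repSet (flag : String) : List String → Int → List Int
  | [], _ => []
  | [_], _ => []
  | x :: y :: ys, j =>
    if x = flag then (j + 1) :: repSet flag ys (j + 2)
    else repSet flag (y :: ys) (j + 1)

lemma repSet_lb (flag : String) : ∀ (l : List String) (j k : Int), k ∈ repSet flag l j → j + 1 ≤ k := by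
  intro l j
  fun_induction repSet flag l j with
  | case1 => simp
  | case2 => simp
  | case3 y ys j ih =>
    intro k hk
    rcases List.mem_cons.mp hk with h | h
    · omega
    · have := ih k h; omega
  | case4 x y ys j hx ih =>
    intro k hk
    have := ih k hk; omega

lemma foldB_eq (flag : String) (L : Int) :
    ∀ (l : List String) (j : Int) (s : List Int),
      j + (l.length : Int) = L → (∀ k ∈ s, k < j) →
      (PySem.List.enumerate l j).foldl
        (fun s p =>
          if p.2 = flag ∧ ¬ p.1 ∈ s ∧ p.1 + 1 < L
          then PySem.Set.add s (p.1 + 1) else s) s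
      = s ++ repSet flag l j := by
  intro l j
  fun_induction repSet flag l j with
  | case1 j => intro s _ _; simp [PySem.List.enumerate_nil]
  | case2 x j =>
    intro s hL hs
    simp only [List.length_cons, List.length_nil] at hL
    have hnl : ¬ ((j : Int) + 1 < L) := by omega
    simp [PySem.List.enumerate_cons, PySem.List.enumerate_nil, hnl]
  | case3 y ys j ih =>
    intro s hL hs
    have hjs : j ∉ s := fun h => absurd (hs j h) (by omega)
    have hlt : j + 1 < L := by simp at hL; omega
    have hj1s : j + 1 ∉ s := fun h => absurd (hs _ h) (by omega)
    have hadd : PySem.Set.add s (j + 1) = s ++ [j + 1] := by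
      simp [PySem.Set.add, PySem.Set.contains, hj1s]
    rw [PySem.List.enumerate_cons, List.foldl_cons, if_pos ⟨rfl, hjs, hlt⟩, hadd,
        PySem.List.enumerate_cons, List.foldl_cons]
    have hmem : (j + 1) ∈ s ++ [j + 1] := by simp
    rw [if_neg (fun hc => hc.2.1 hmem)]
    rw [show (j : Int) + 1 + 1 = j + 2 by ring]
    rw [ih (s ++ [j + 1]) (by simp at hL ⊢; omega)
        (by intro k hk; rcases List.mem_append.mp hk with h | h
            · have := hs k h; omega
            · simp at h; omega)]
    simp
  | case4 x y ys j hx ih =>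
    intro s hL hs
    rw [PySem.List.enumerate_cons, List.foldl_cons]
    rw [if_neg (fun hc => hx hc.1)]
    rw [ih s (by simp at hL ⊢; omega) (by intro k hk; have := hs k hk; omega)]

lemma mapB_eq (flag new_value : String) :
    ∀ (l : List String) (j : Int) (pre : List Int),
      (∀ k ∈ pre, k < j) →
      (PySem.List.enumerate l j).map
        (fun p => if p.1 ∈ pre ++ repSet flag l j then new_value else p.2)
      = repRef flag new_value l := by
  intro l j
  fun_induction repSet flag l j with
  | case1 j => intro pre _; simp [PySem.List.enumerate_nil, repRef]
  | case2 x j =>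
    intro pre hpre
    have hj : (j : Int) ∉ pre := fun h => absurd (hpre j h) (by omega)
    simp [PySem.List.enumerate_nil, PySem.List.enumerate_cons, repRef, hj]
  | case3 y ys j ih =>
    intro pre hpre
    have hj : (j : Int) ∉ pre ++ (j + 1) :: repSet flag ys (j + 2) := by
      intro h
      rcases List.mem_append.mp h with h | h
      · have := hpre j h; omega
      · rcases List.mem_cons.mp h with h | h
        · omega
        · have := repSet_lb flag _ _ _ h; omega
    have hj1 : (j + 1) ∈ pre ++ (j + 1) :: repSet flag ys (j + 2) := by simp
    rw [PySem.List.enumerate_cons, List.map_cons, PySem.List.enumerate_cons, List.map_cons]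
    rw [if_neg hj, if_pos hj1]
    rw [show (j : Int) + 1 + 1 = j + 2 by ring]
    have hre : pre ++ (j + 1) :: repSet flag ys (j + 2)
        = (pre ++ [j + 1]) ++ repSet flag ys (j + 2) := by simp
    rw [hre]
    rw [ih (pre ++ [j + 1])
        (by intro k hk; rcases List.mem_append.mp hk with h | h
            · have := hpre k h; omega
            · simp at h; omega)]
    simp [repRef]
  | case4 x y ys j hx ih =>
    intro pre hpre
    have hj : (j : Int) ∉ pre ++ repSet flag (y :: ys) (j + 1) := by
      intro h
      rcases List.mem_append.mp h with h | h
      · have := hpre j h; omega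
      · have := repSet_lb flag _ _ _ h; omega
    rw [PySem.List.enumerate_cons, List.map_cons, if_neg hj]
    rw [ih pre (by intro k hk; have := hpre k hk; omega)]
    simp [repRef, hx]

lemma altB_eq (argv : List String) (flag new_value : String) :
    replace_flag_value_py_alt argv flag new_value = repRef flag new_value argv := by
  unfold replace_flag_value_py_alt
  rw [show (PySem.Set.empty : PySem.Set Int) = ([] : List Int) from rfl]
  rw [foldB_eq flag (argv.length : Int) argv 0 [] (by simp) (by simp)]
  simpa using mapB_eq flag new_value argv 0 [] (by simp)

lemma goA_eq (argv : List String) (flag new_value : String) (i : Nat) (result : List String) :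
    replace_flag_value_go argv flag new_value i result
      = result ++ repRef flag new_value (argv.drop i) := by
  fun_induction replace_flag_value_go argv flag new_value i result with
  | case1 i result h hf ih =>
    obtain ⟨hfl, hlt⟩ := hf
    rw [ih, (List.getElem_cons_drop h).symm, (List.getElem_cons_drop hlt).symm]
    simp [repRef, hfl]
  | case2 i result h hf ih =>
    rw [ih, (List.getElem_cons_drop h).symm]
    rcases Nat.lt_or_ge (i + 1) argv.length with hlt | hge
    · have hfl : argv[i] ≠ flag := fun hc => hf ⟨hc, hlt⟩
      rw [(List.getElem_cons_drop hlt).symm]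
      simp [repRef, hfl]
    · have hnil : argv.drop (i + 1) = [] := List.drop_eq_nil_of_le hge
      simp [hnil, repRef]
  | case3 i result h =>
    have hnil : argv.drop i = [] := List.drop_eq_nil_of_le (Nat.le_of_not_lt h)
    simp [hnil, repRef]

-- ===== VERDICT (by name: the statement is the Claim_ definition above) =====
theorem replace_flag_value_py_spec : Claim_equal_replace_flag_value_py := by
  intro argv flag new_value _
  unfold Spec_replace_flag_value_py replace_flag_value_py
  rw [goA_eq, altB_eq]
  simp
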